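-- pv_equiv track=rewrite | github.com/nyucel/kriptografi | butunleme/170401057/butunleme.py | ozet
-- ===== SOURCE A (Python) =====
-- def ozet(girdi):
--     asci = ''
--     for i in range(6):
--         asci += (str(ord(girdi[i]))).zfill(3) # ascii ye çevirirken ilk 0 ı koymadığı için ben koydum.
--     binAsci = bin(int(asci))[2:].zfill(64)
--
--     ilk32 = binAsci[:32]
--     son32 = binAsci[32:]
--
--     firstXor = bin(int(ilk32[0]) ^ int(son32[0]))[2:]
--     yeni = firstXor # yeni değişkenimiz ilk32 ve son32 nin ilk basamakalrını xorlamakla başlıyor ve aşağıdaki for da daima güncelleniyor.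
--     for i in range(1,32):
--         xor = bin(int(firstXor) ^  (int(ilk32[i]) & int(son32[i])))[2:]
--         yeni += xor
--         firstXor = xor
--
--     binAsciReverse = binAsci[len(binAsci)::-1] # yukarıdaki binAsci mizi ters çevirdik.
--     #aşağıda binAscinin ters halini aynı döngüye soktuk
--     ilk32 = binAsciReverse[:32]
--     son32 = binAsciReverse[32:]
--
--     firstXor = bin(int(ilk32[0]) ^ int(son32[0]))[2:]
--     yeni2 = firstXor
--     for i in range(1,32):
--         xor = bin(int(firstXor) ^  (int(ilk32[i]) | int(son32[i])))[2:]
--         yeni2 += xor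
--         firstXor = xor
--     yeniXor = bin(int(yeni,2) ^ int(yeni2,2))[2:].zfill(32)
--     return yeniXor
-- ===== SOURCE B (Python) =====
-- def _parity_bits(ilk, son, comb):
--     # output position i = parity of (head xor) plus the count of combined pairs in the prefix 1..i
--     head = int(ilk[0]) ^ int(son[0])
--     return ''.join(
--         str((head + sum(comb(int(ilk[j]), int(son[j])) for j in range(1, i + 1))) % 2)
--         for i in range(32))
--
--
-- def ozet(girdi):
--     asci = ''.join(str(ord(girdi[i])).zfill(3) for i in range(6))
--     binAsci = bin(int(asci))[2:].zfill(64)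
--     yeni = _parity_bits(binAsci[:32], binAsci[32:], lambda x, y: x & y)
--     ters = binAsci[::-1]
--     yeni2 = _parity_bits(ters[:32], ters[32:], lambda x, y: x | y)
--     return bin(int(yeni, 2) ^ int(yeni2, 2))[2:].zfill(32)
-- ===== Notes on version B (the rewrite author's own statement) =====
-- stated objective: alternative
-- what changed: B discards A's sequential scan entirely: instead of threading a running firstXor state through two copy-pasted loops with per-step int()/bin() string round trips, B computes every output bit independently and statelessly as a prefix parity -- bit i is (head xor + count of combined pairs among positions 1..i) mod 2 -- so the two halves become pure per-position counting (quadratic recomputation) with no carried state at all.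
import Mathlib
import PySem

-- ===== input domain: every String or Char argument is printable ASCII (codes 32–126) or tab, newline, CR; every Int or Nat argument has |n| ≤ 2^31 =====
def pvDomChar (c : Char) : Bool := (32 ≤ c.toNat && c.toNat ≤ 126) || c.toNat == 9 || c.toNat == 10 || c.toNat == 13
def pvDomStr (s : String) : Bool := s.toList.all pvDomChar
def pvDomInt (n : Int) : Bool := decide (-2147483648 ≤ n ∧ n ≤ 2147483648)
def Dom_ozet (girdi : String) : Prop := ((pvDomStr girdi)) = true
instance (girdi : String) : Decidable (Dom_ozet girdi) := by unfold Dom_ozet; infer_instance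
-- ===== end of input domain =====

-- B replaces A's two stateful scans (a running firstXor threaded through int()/bin() round trips)
-- by a stateless per-position rule: output bit i is the parity of the head xor plus the count of
-- combined pairs in the prefix 1..i (alternative decomposition, no running state); equal to A
-- wherever A returns (len ≥ 6).

-- ===== PORT A =====
-- Literal transliteration of A.  int(...) is ported as (PySem.Int.ofChars? ...).getD 0: on every
-- input admitted by Pre_ozet the parsed strings are nonempty digit strings, so the default is dead.
def ozet (girdi : String) : String :=
  -- for i in range(6): asci += str(ord(girdi[i])).zfill(3)
  let asci : List Char :=
    (PySem.List.pyRange 0 6 1).foldl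
      (fun asci i =>
        asci ++ PySem.Chars.zfill (PySem.Int.toChars ((PySem.List.pyGetD girdi.toList i 'a').toNat : Int)) 3) []
  -- binAsci = bin(int(asci))[2:].zfill(64)
  let binAsci : List Char :=
    PySem.Chars.zfill ((PySem.Int.toBinChars0b ((PySem.Int.ofChars? asci).getD 0)).drop 2) 64
  let ilk32 := PySem.List.slice binAsci none (some 32)
  let son32 := PySem.List.slice binAsci (some 32) none
  let firstXor : List Char :=
    (PySem.Int.toBinChars0b (Int.xor
        ((PySem.Int.ofChars? [PySem.List.pyGetD ilk32 0 '0']).getD 0)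
        ((PySem.Int.ofChars? [PySem.List.pyGetD son32 0 '0']).getD 0))).drop 2
  let st1 :=
    (PySem.List.pyRange 1 32 1).foldl
      (fun (st : List Char × List Char) i =>
        let x := (PySem.Int.toBinChars0b (Int.xor ((PySem.Int.ofChars? st.1).getD 0)
            (Int.land ((PySem.Int.ofChars? [PySem.List.pyGetD ilk32 i '0']).getD 0)
                      ((PySem.Int.ofChars? [PySem.List.pyGetD son32 i '0']).getD 0)))).drop 2
        (x, st.2 ++ x))
      (firstXor, firstXor)
  let yeni := st1.2
  -- binAsciReverse = binAsci[len(binAsci)::-1]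
  let binAsciReverse := (PySem.List.slice? binAsci (some (PySem.List.len binAsci)) none (-1)).getD []
  let ilk32r := PySem.List.slice binAsciReverse none (some 32)
  let son32r := PySem.List.slice binAsciReverse (some 32) none
  let firstXor2 : List Char :=
    (PySem.Int.toBinChars0b (Int.xor
        ((PySem.Int.ofChars? [PySem.List.pyGetD ilk32r 0 '0']).getD 0)
        ((PySem.Int.ofChars? [PySem.List.pyGetD son32r 0 '0']).getD 0))).drop 2
  let st2 :=
    (PySem.List.pyRange 1 32 1).foldl
      (fun (st : List Char × List Char) i =>
        let x := (PySem.Int.toBinChars0b (Int.xor ((PySem.Int.ofChars? st.1).getD 0)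
            (Int.lor ((PySem.Int.ofChars? [PySem.List.pyGetD ilk32r i '0']).getD 0)
                     ((PySem.Int.ofChars? [PySem.List.pyGetD son32r i '0']).getD 0)))).drop 2
        (x, st.2 ++ x))
      (firstXor2, firstXor2)
  let yeni2 := st2.2
  String.ofList (PySem.Chars.zfill ((PySem.Int.toBinChars0b (Int.xor
      ((PySem.Int.ofCharsBase? yeni 2).getD 0)
      ((PySem.Int.ofCharsBase? yeni2 2).getD 0))).drop 2) 32)

-- ===== PORT B =====
-- _parity_bits(ilk, son, comb): bit i = (head + sum of comb over prefix 1..i) % 2, no running state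
def ozetParity (ilk son : List Char) (op : Int → Int → Int) : List Char :=
  -- head = int(ilk[0]) ^ int(son[0]), inlined into the per-position parity
  ((PySem.List.pyRange 0 32 1).map (fun i =>
      PySem.Int.toChars (PySem.Int.mod (
        Int.xor ((PySem.Int.ofChars? [PySem.List.pyGetD ilk 0 '0']).getD 0)
                ((PySem.Int.ofChars? [PySem.List.pyGetD son 0 '0']).getD 0) +
        (PySem.List.pyRange 1 (i + 1) 1).foldl (fun acc j =>
            acc + op ((PySem.Int.ofChars? [PySem.List.pyGetD ilk j '0']).getD 0)
                     ((PySem.Int.ofChars? [PySem.List.pyGetD son j '0']).getD 0)) 0) 2))).flatten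

def ozet_alt (girdi : String) : String :=
  -- asci = ''.join(str(ord(girdi[i])).zfill(3) for i in range(6))
  let asci : List Char :=
    ((PySem.List.pyRange 0 6 1).map
      (fun i => PySem.Chars.zfill (PySem.Int.toChars
        ((PySem.List.pyGetD girdi.toList i 'a').toNat : Int)) 3)).flatten
  let binAsci : List Char :=
    PySem.Chars.zfill ((PySem.Int.toBinChars0b ((PySem.Int.ofChars? asci).getD 0)).drop 2) 64
  let yeni := ozetParity (PySem.List.slice binAsci none (some 32)) (PySem.List.slice binAsci (some 32) none) Int.land
  let ters := (PySem.List.slice? binAsci none none (-1)).getD []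
  let yeni2 := ozetParity (PySem.List.slice ters none (some 32)) (PySem.List.slice ters (some 32) none) Int.lor
  String.ofList (PySem.Chars.zfill ((PySem.Int.toBinChars0b (Int.xor
      ((PySem.Int.ofCharsBase? yeni 2).getD 0)
      ((PySem.Int.ofCharsBase? yeni2 2).getD 0))).drop 2) 32)

-- ===== PRECONDITION & SPEC =====
-- girdi[i] for i in range(6) raises IndexError on strings shorter than 6 characters
def Pre_ozet (girdi : String) : Prop := 6 ≤ girdi.toList.length
instance (girdi : String) : Decidable (Pre_ozet girdi) := by unfold Pre_ozet; infer_instance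
def pvWitness_ozet : String := "abc123"

def Spec_ozet (girdi : String) (out : String) : Prop := out = ozet_alt girdi
instance (girdi : String) (out : String) : Decidable (Spec_ozet girdi out) := by unfold Spec_ozet; infer_instance

-- ===== CLAIM (what is proved, stated in full; the proofs are below) =====
def Claim_equal_ozet : Prop := ∀ (girdi : String), Dom_ozet girdi → Pre_ozet girdi → Spec_ozet girdi (ozet girdi)

-- ===== LEMMAS AND PROOFS =====

-- value of a parsed single bit character
lemma pvParseBit {c : Char} (h : c = '0' ∨ c = '1') :
    (PySem.Int.ofChars? [c]).getD 0 = 0 ∨ (PySem.Int.ofChars? [c]).getD 0 = 1 := by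
  rcases h with h | h <;> subst h <;> decide

lemma pvXorBit {x y : Int} (hx : x = 0 ∨ x = 1) (hy : y = 0 ∨ y = 1) :
    Int.xor x y = 0 ∨ Int.xor x y = 1 := by
  rcases hx with h | h <;> rcases hy with g | g <;> subst h <;> subst g <;> decide

lemma pvLandBit {x y : Int} (hx : x = 0 ∨ x = 1) (hy : y = 0 ∨ y = 1) :
    Int.land x y = 0 ∨ Int.land x y = 1 := by
  rcases hx with h | h <;> rcases hy with g | g <;> subst h <;> subst g <;> decide

lemma pvLorBit {x y : Int} (hx : x = 0 ∨ x = 1) (hy : y = 0 ∨ y = 1) :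
    Int.lor x y = 0 ∨ Int.lor x y = 1 := by
  rcases hx with h | h <;> subst h <;> rcases hy with g | g <;> subst g <;> decide

-- decimal round trip on a bit value (A re-reads its own one-character state string)
lemma pvRoundTrip {v : Int} (h : v = 0 ∨ v = 1) :
    (PySem.Int.ofChars? (PySem.Int.toChars v)).getD 0 = v := by
  rcases h with h | h <;> subst h <;> decide

-- bin(v)[2:] = str(v) on a bit value
lemma pvGBit {v : Int} (h : v = 0 ∨ v = 1) :
    (PySem.Int.toBinChars0b v).drop 2 = PySem.Int.toChars v := by
  rcases h with h | h <;> subst h <;> decide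

-- combined bit stream of the two halves (head: xor; tail: op)
def pvD (s : List Char) (i : Int) : Int := (PySem.Int.ofChars? [PySem.List.pyGetD s i '0']).getD 0

def pvCF (a b : List Char) (op : Int → Int → Int) (i : Int) : Int :=
  if i = 0 then Int.xor (pvD a 0) (pvD b 0) else op (pvD a i) (pvD b i)

-- running xor of the combined bit stream
def pvAccv (cf : Int → Int) : Nat → Int
  | 0 => cf 0
  | n + 1 => Int.xor (pvAccv cf n) (cf ((n : Int) + 1))

lemma pvAccvBit {cf : Int → Int} (hcf : ∀ i : Int, 0 ≤ i → i ≤ 31 → cf i = 0 ∨ cf i = 1) :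
    ∀ k : Nat, k ≤ 31 → pvAccv cf k = 0 ∨ pvAccv cf k = 1 := by
  intro k
  induction k with
  | zero => intro _; exact hcf 0 (by omega) (by omega)
  | succ n ih =>
    intro h
    exact pvXorBit (ih (by omega)) (hcf ((n : Int) + 1) (by omega) (by omega))

-- A's fused loop, characterised: state = last accumulated bit, output = all accumulated bits
lemma pvLoopA (cf : Int → Int) (hcf : ∀ i : Int, 0 ≤ i → i ≤ 31 → cf i = 0 ∨ cf i = 1) :
    ∀ n : Nat, 1 ≤ n → n ≤ 32 →
    (PySem.List.pyRange 1 (n : Int) 1).foldl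
      (fun (st : List Char × List Char) i =>
        let x := (PySem.Int.toBinChars0b (Int.xor ((PySem.Int.ofChars? st.1).getD 0) (cf i))).drop 2
        (x, st.2 ++ x))
      ((PySem.Int.toBinChars0b (cf 0)).drop 2, (PySem.Int.toBinChars0b (cf 0)).drop 2)
    = (PySem.Int.toChars (pvAccv cf (n - 1)),
       (List.range n).flatMap (fun k => PySem.Int.toChars (pvAccv cf k))) := by
  intro n hn
  induction n, hn using Nat.le_induction with
  | base =>
    intro _
    rw [show ((1 : Nat) : Int) = 1 by norm_num, PySem.List.pyRange_one_eq_nil le_rfl]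
    simp only [List.foldl_nil, List.range_one, List.flatMap_cons, List.flatMap_nil,
      List.append_nil]
    rw [pvGBit (hcf 0 (by omega) (by omega))]
    rfl
  | succ n hn ih =>
    intro h32
    have hcast : ((n + 1 : Nat) : Int) = (n : Int) + 1 := by push_cast; ring
    rw [hcast, PySem.List.pyRange_one_succ_right (by exact_mod_cast hn), List.foldl_append,
      ih (by omega), List.foldl_cons, List.foldl_nil]
    dsimp only
    have haccp : pvAccv cf (n - 1) = 0 ∨ pvAccv cf (n - 1) = 1 := pvAccvBit hcf (n - 1) (by omega)
    rw [pvRoundTrip haccp]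
    have hstep : Int.xor (pvAccv cf (n - 1)) (cf (n : Int)) = pvAccv cf n := by
      cases n with
      | zero => omega
      | succ m =>
        show Int.xor (pvAccv cf (m + 1 - 1)) (cf ((m + 1 : Nat) : Int)) = pvAccv cf (m + 1)
        rw [Nat.add_sub_cancel, show ((m + 1 : Nat) : Int) = (m : Int) + 1 by push_cast; ring]
        rfl
    rw [hstep, pvGBit (pvAccvBit hcf n (by omega)), Nat.add_sub_cancel, List.range_succ,
      List.flatMap_append, List.flatMap_cons, List.flatMap_nil, List.append_nil]

-- bits of the combined stream are bits
lemma pvCFBit (a b : List Char) (op : Int → Int → Int)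
    (ha : ∀ c ∈ a, c = '0' ∨ c = '1') (hb : ∀ c ∈ b, c = '0' ∨ c = '1')
    (hla : a.length = 32) (hlb : 32 ≤ b.length)
    (hop : ∀ x y : Int, (x = 0 ∨ x = 1) → (y = 0 ∨ y = 1) → (op x y = 0 ∨ op x y = 1)) :
    ∀ i : Int, 0 ≤ i → i ≤ 31 → pvCF a b op i = 0 ∨ pvCF a b op i = 1 := by
  have hbitD : ∀ (s : List Char) (i : Int), (∀ c ∈ s, c = '0' ∨ c = '1') → 0 ≤ i → i < s.length →
      pvD s i = 0 ∨ pvD s i = 1 := by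
    intro s i hs h0 hi
    exact pvParseBit (hs _ (PySem.List.pyGetD_mem s '0' (by
      unfold PySem.Raise.InRange
      constructor <;> [omega; exact hi])))
  intro i h0 h31
  by_cases hi : i = 0
  · subst hi
    unfold pvCF
    rw [if_pos rfl]
    exact pvXorBit (hbitD a 0 ha (by omega) (by simp [hla]))
      (hbitD b 0 hb (by omega) (by omega))
  · unfold pvCF
    rw [if_neg hi]
    exact hop _ _ (hbitD a i ha h0 (by simp [hla]; omega))
      (hbitD b i hb h0 (by omega))

-- A's half, characterised: the output string is the accumulated bits of the combined stream
lemma pvHalfA (a b : List Char) (op : Int → Int → Int)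
    (hcf : ∀ i : Int, 0 ≤ i → i ≤ 31 → pvCF a b op i = 0 ∨ pvCF a b op i = 1) :
    ((PySem.List.pyRange 1 32 1).foldl
      (fun (st : List Char × List Char) i =>
        let x := (PySem.Int.toBinChars0b (Int.xor ((PySem.Int.ofChars? st.1).getD 0)
            (op ((PySem.Int.ofChars? [PySem.List.pyGetD a i '0']).getD 0)
                ((PySem.Int.ofChars? [PySem.List.pyGetD b i '0']).getD 0)))).drop 2
        (x, st.2 ++ x))
      ((PySem.Int.toBinChars0b (Int.xor
          ((PySem.Int.ofChars? [PySem.List.pyGetD a 0 '0']).getD 0)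
          ((PySem.Int.ofChars? [PySem.List.pyGetD b 0 '0']).getD 0))).drop 2,
       (PySem.Int.toBinChars0b (Int.xor
          ((PySem.Int.ofChars? [PySem.List.pyGetD a 0 '0']).getD 0)
          ((PySem.Int.ofChars? [PySem.List.pyGetD b 0 '0']).getD 0))).drop 2)).2
    = (List.range 32).flatMap (fun k => PySem.Int.toChars (pvAccv (pvCF a b op) k)) := by
  have hbody : ∀ (st : List Char × List Char), ∀ i ∈ PySem.List.pyRange 1 32 1,
      (fun (st : List Char × List Char) i =>
        let x := (PySem.Int.toBinChars0b (Int.xor ((PySem.Int.ofChars? st.1).getD 0)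
            (op ((PySem.Int.ofChars? [PySem.List.pyGetD a i '0']).getD 0)
                ((PySem.Int.ofChars? [PySem.List.pyGetD b i '0']).getD 0)))).drop 2
        (x, st.2 ++ x)) st i
      = (fun (st : List Char × List Char) i =>
        let x := (PySem.Int.toBinChars0b (Int.xor ((PySem.Int.ofChars? st.1).getD 0)
            (pvCF a b op i))).drop 2
        (x, st.2 ++ x)) st i := by
    intro st i hi
    have hi' := (PySem.List.mem_pyRange_one).1 hi
    dsimp only
    unfold pvCF pvD
    rw [if_neg (by omega : ¬ i = 0)]
  rw [PySem.List.foldl_congr_mem _ _ _ _ hbody]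
  have hinit : (PySem.Int.toBinChars0b (Int.xor
          ((PySem.Int.ofChars? [PySem.List.pyGetD a 0 '0']).getD 0)
          ((PySem.Int.ofChars? [PySem.List.pyGetD b 0 '0']).getD 0))).drop 2
      = (PySem.Int.toBinChars0b (pvCF a b op 0)).drop 2 := by
    unfold pvCF pvD
    rw [if_pos rfl]
  rw [hinit]
  rw [show (32 : Int) = ((32 : Nat) : Int) by norm_num]
  rw [pvLoopA (pvCF a b op) hcf 32 (by norm_num) le_rfl]

-- B's per-position parity equals A's running xor
lemma pvSumParity (cf : Int → Int) (hcf : ∀ i : Int, 0 ≤ i → i ≤ 31 → cf i = 0 ∨ cf i = 1) :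
    ∀ k : Nat, k ≤ 31 →
      PySem.Int.mod (cf 0 +
        (PySem.List.pyRange 1 ((k : Int) + 1) 1).foldl (fun acc j => acc + cf j) 0) 2
      = pvAccv cf k := by
  intro k
  induction k with
  | zero =>
    intro _
    rw [show ((0 : Nat) : Int) + 1 = 1 by norm_num, PySem.List.pyRange_one_eq_nil le_rfl]
    simp only [List.foldl_nil, add_zero]
    rw [PySem.Int.mod_eq_emod_of_pos (show (0:Int) < 2 by norm_num)]
    show _ = cf 0
    rcases hcf 0 (by omega) (by omega) with h | h <;> rw [h] <;> norm_num
  | succ n ih =>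
    intro h31
    have hcast : ((n + 1 : Nat) : Int) + 1 = ((n : Int) + 1) + 1 := by push_cast; ring
    rw [hcast, PySem.List.pyRange_one_succ_right (by omega), List.foldl_append,
      List.foldl_cons, List.foldl_nil]
    have hih := ih (by omega)
    rw [PySem.Int.mod_eq_emod_of_pos (show (0:Int) < 2 by norm_num)] at hih ⊢
    have hc : cf ((n : Int) + 1) = 0 ∨ cf ((n : Int) + 1) = 1 :=
      hcf _ (by omega) (by omega)
    have hp : pvAccv cf n = 0 ∨ pvAccv cf n = 1 := pvAccvBit hcf n (by omega)
    have hstep : pvAccv cf (n + 1) = Int.xor (pvAccv cf n) (cf ((n : Int) + 1)) := rfl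
    rw [hstep, ← add_assoc]
    rcases hp with hp | hp <;> rcases hc with hc | hc <;>
      rw [hp, hc] <;> rw [hp] at hih <;>
      simp only [show Int.xor 0 0 = 0 from by decide, show Int.xor 0 1 = 1 from by decide,
        show Int.xor 1 0 = 1 from by decide, show Int.xor 1 1 = 0 from by decide] <;>
      omega

-- B's half, characterised: the same accumulated bits, computed positionwise
lemma pvHalfB (a b : List Char) (op : Int → Int → Int)
    (hcf : ∀ i : Int, 0 ≤ i → i ≤ 31 → pvCF a b op i = 0 ∨ pvCF a b op i = 1) :
    ozetParity a b op
    = (List.range 32).flatMap (fun k => PySem.Int.toChars (pvAccv (pvCF a b op) k)) := by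
  unfold ozetParity
  rw [show PySem.List.pyRange 0 32 1 = (List.range 32).map (fun k : Nat => (k : Int)) from by decide]
  rw [List.map_map, List.flatMap_def]
  congr 1
  apply List.map_congr_left
  intro k hk
  have hk' : k < 32 := List.mem_range.1 hk
  simp only [Function.comp_apply]
  congr 1
  have hbody : ∀ (acc : Int), ∀ j ∈ PySem.List.pyRange 1 ((k : Int) + 1) 1,
      (fun acc j => acc + op ((PySem.Int.ofChars? [PySem.List.pyGetD a j '0']).getD 0)
                             ((PySem.Int.ofChars? [PySem.List.pyGetD b j '0']).getD 0)) acc j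
      = (fun acc j => acc + pvCF a b op j) acc j := by
    intro acc j hj
    have hj' := (PySem.List.mem_pyRange_one).1 hj
    dsimp only
    unfold pvCF pvD
    rw [if_neg (by omega : ¬ j = 0)]
  rw [PySem.List.foldl_congr_mem _ _ _ _ hbody]
  have hhead : Int.xor ((PySem.Int.ofChars? [PySem.List.pyGetD a 0 '0']).getD 0)
                       ((PySem.Int.ofChars? [PySem.List.pyGetD b 0 '0']).getD 0)
      = pvCF a b op 0 := by
    unfold pvCF pvD
    rw [if_pos rfl]
  rw [hhead]
  exact pvSumParity (pvCF a b op) hcf k (by omega)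

lemma pvGet0 (c0 c1 c2 c3 c4 c5 : Char) (rest : List Char) :
    PySem.List.pyGetD (c0::c1::c2::c3::c4::c5::rest) (0:Int) 'a' = c0 := by
  simp [PySem.List.pyGetD, PySem.List.pyGet?, PySem.List.pyIdx?]
  rw [if_pos (by omega)]
  simp

lemma pvGet1 (c0 c1 c2 c3 c4 c5 : Char) (rest : List Char) :
    PySem.List.pyGetD (c0::c1::c2::c3::c4::c5::rest) (1:Int) 'a' = c1 := by
  simp [PySem.List.pyGetD, PySem.List.pyGet?, PySem.List.pyIdx?]
  rw [if_pos (by omega)]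
  simp

lemma pvGet2 (c0 c1 c2 c3 c4 c5 : Char) (rest : List Char) :
    PySem.List.pyGetD (c0::c1::c2::c3::c4::c5::rest) (2:Int) 'a' = c2 := by
  simp [PySem.List.pyGetD, PySem.List.pyGet?, PySem.List.pyIdx?]
  rw [if_pos (by omega)]
  simp

lemma pvGet3 (c0 c1 c2 c3 c4 c5 : Char) (rest : List Char) :
    PySem.List.pyGetD (c0::c1::c2::c3::c4::c5::rest) (3:Int) 'a' = c3 := by
  simp [PySem.List.pyGetD, PySem.List.pyGet?, PySem.List.pyIdx?]
  rw [if_pos (by omega)]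
  simp

lemma pvGet4 (c0 c1 c2 c3 c4 c5 : Char) (rest : List Char) :
    PySem.List.pyGetD (c0::c1::c2::c3::c4::c5::rest) (4:Int) 'a' = c4 := by
  simp [PySem.List.pyGetD, PySem.List.pyGet?, PySem.List.pyIdx?]
  rw [if_pos (by omega)]
  simp

lemma pvGet5 (c0 c1 c2 c3 c4 c5 : Char) (rest : List Char) :
    PySem.List.pyGetD (c0::c1::c2::c3::c4::c5::rest) (5:Int) 'a' = c5 := by
  simp [PySem.List.pyGetD, PySem.List.pyGet?, PySem.List.pyIdx?]
  rw [if_pos (by omega)]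
  simp

lemma pvAsciA (c0 c1 c2 c3 c4 c5 : Char) (rest : List Char) :
    (PySem.List.pyRange 0 6 1).foldl
      (fun asci i => asci ++ PySem.Chars.zfill (PySem.Int.toChars
        ((PySem.List.pyGetD (c0::c1::c2::c3::c4::c5::rest) i 'a').toNat : Int)) 3) []
  = (([c0,c1,c2,c3,c4,c5]).map
      (fun c => PySem.Chars.zfill (PySem.Int.toChars ((c.toNat : Int))) 3)).flatten := by
  rw [show PySem.List.pyRange 0 6 1 = [0,1,2,3,4,5] from by decide]
  simp only [List.foldl_cons, List.foldl_nil]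
  rw [pvGet0, pvGet1, pvGet2, pvGet3, pvGet4, pvGet5]
  simp [List.append_assoc]

lemma pvAsciB (c0 c1 c2 c3 c4 c5 : Char) (rest : List Char) :
    ((PySem.List.pyRange 0 6 1).map
      (fun i => PySem.Chars.zfill (PySem.Int.toChars
        ((PySem.List.pyGetD (c0::c1::c2::c3::c4::c5::rest) i 'a').toNat : Int)) 3)).flatten
  = (([c0,c1,c2,c3,c4,c5]).map
      (fun c => PySem.Chars.zfill (PySem.Int.toChars ((c.toNat : Int))) 3)).flatten := by
  rw [show PySem.List.pyRange 0 6 1 = [0,1,2,3,4,5] from by decide]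
  simp only [List.map_cons, List.map_nil]
  rw [pvGet0, pvGet1, pvGet2, pvGet3, pvGet4, pvGet5]

-- every character the 6 header triples can produce is a decimal digit
lemma pvTripleDigits : ∀ m : Nat, m < 127 →
    ((PySem.Chars.zfill (PySem.Int.toChars (m : Int)) 3).all Char.isDigit) = true := by
  decide

lemma pvOptNonneg (o : Option Nat) :
    0 ≤ (Option.map (fun n : Int => n) (o.bind (fun a => some ((a : Int))))).getD 0 := by
  cases o <;> simp

lemma pvNonneg (as : List Char) (hne : as ≠ []) (h : ∀ c ∈ as, c.isDigit) :
    0 ≤ (PySem.Int.ofChars? as).getD 0 := by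
  have hds : ∀ c ∈ as, PySem.Int.isIntSpace c = false := by
    intro c hc
    have hd := h c hc
    unfold PySem.Int.isIntSpace
    simp only [Bool.or_eq_false_iff, decide_eq_false_iff_not]
    refine ⟨⟨⟨⟨⟨?_, ?_⟩, ?_⟩, ?_⟩, ?_⟩, ?_⟩ <;> (rintro rfl; revert hd; decide)
  have h1 : List.dropWhile PySem.Int.isIntSpace as = as := by
    rw [List.dropWhile_eq_self_iff]
    intro hl
    simp only [hds _ (List.getElem_mem hl)]
    simp
  have h2 : List.dropWhile PySem.Int.isIntSpace as.reverse = as.reverse := by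
    rw [List.dropWhile_eq_self_iff]
    intro hl
    have hm : as.reverse[0] ∈ as := List.mem_reverse.1 (List.getElem_mem hl)
    simp only [hds _ hm]
    simp
  unfold PySem.Int.ofChars?
  rw [h1, h2, List.reverse_reverse]
  obtain ⟨d, t, rfl⟩ := List.exists_cons_of_ne_nil hne
  have hd := h d (List.mem_cons_self ..)
  dsimp only
  split
  · rename_i ds heq
    exfalso; revert hd
    injection heq with h1 h2
    rw [h1]; decide
  · rename_i ds heq
    exfalso; revert hd
    injection heq with h1 h2
    rw [h1]; decide
  · exact pvOptNonneg _

lemma pvToDigitsBits : ∀ (fuel n : Nat) (acc : List Char),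
    (∀ c ∈ acc, c = '0' ∨ c = '1') → ∀ c ∈ Nat.toDigitsCore 2 fuel n acc, c = '0' ∨ c = '1' := by
  intro fuel
  induction fuel with
  | zero => intro n acc hacc c hc; rw [Nat.toDigitsCore.eq_def] at hc; dsimp only at hc; exact hacc c hc
  | succ f ih =>
    intro n acc hacc c hc
    rw [Nat.toDigitsCore.eq_def] at hc
    dsimp only at hc
    have hacc' : ∀ c ∈ (n % 2).digitChar :: acc, c = '0' ∨ c = '1' := by
      intro c hc
      rcases List.mem_cons.1 hc with rfl | hc2
      · rcases Nat.mod_two_eq_zero_or_one n with h | h <;> rw [h] <;> decide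
      · exact hacc c hc2
    split at hc
    · exact hacc' c hc
    · exact ih _ _ hacc' c hc

lemma pvZfillBits (cs : List Char) (w : Int) (h : ∀ c ∈ cs, c = '0' ∨ c = '1') :
    ∀ c ∈ PySem.Chars.zfill cs w, c = '0' ∨ c = '1' := by
  intro c hc
  cases cs with
  | nil =>
    unfold PySem.Chars.zfill at hc
    split at hc
    · exact absurd hc (List.not_mem_nil)
    · dsimp only at hc
      exact Or.inl (List.eq_of_mem_replicate hc)
  | cons d rest =>
    unfold PySem.Chars.zfill at hc
    split at hc
    · exact h c hc
    · dsimp only at hc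
      split at hc
      · rcases List.mem_cons.1 hc with rfl | hc2
        · exact h _ (List.mem_cons_self ..)
        · rcases List.mem_append.1 hc2 with h3 | h3
          · exact Or.inl (List.eq_of_mem_replicate h3)
          · exact h _ (List.mem_cons_of_mem _ h3)
      · rcases List.mem_append.1 hc with h3 | h3
        · exact Or.inl (List.eq_of_mem_replicate h3)
        · exact h _ h3

lemma pvFMrev {α : Type} : ∀ (n : Nat) (ys : List α), ys.length = n →
    List.filterMap (fun k : Nat => ys[n - 1 - k]?) (List.range n) = ys.reverse := by
  intro n
  induction n with
  | zero => intro ys hy; rw [List.eq_nil_of_length_eq_zero hy]; simp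
  | succ m ih =>
    intro ys hy
    rcases List.eq_nil_or_concat ys with rfl | ⟨zs, a, rfl⟩
    · simp at hy
    · simp only [List.concat_eq_append] at hy ⊢
      have hz : zs.length = m := by simp at hy; omega
      rw [List.range_succ_eq_map, List.filterMap_cons]
      have h0 : (zs ++ [a])[m + 1 - 1 - 0]? = some a := by
        simp only [Nat.sub_zero, Nat.add_sub_cancel]
        rw [← hz, List.getElem?_append_right (le_refl _)]
        simp
      rw [h0, List.filterMap_map]
      have hcg : List.filterMap ((fun k : Nat => (zs ++ [a])[m + 1 - 1 - k]?) ∘ Nat.succ) (List.range m)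
          = List.filterMap (fun k : Nat => zs[m - 1 - k]?) (List.range m) := by
        apply List.filterMap_congr
        intro k hk
        have hk' := List.mem_range.1 hk
        simp only [Function.comp_apply, Nat.succ_eq_add_one]
        have he : m + 1 - 1 - (k + 1) = m - 1 - k := by omega
        rw [he]
        rcases Nat.eq_zero_or_pos m with rfl | hm
        · omega
        · rw [List.getElem?_append_left (by omega)]
      rw [hcg, ih zs hz, List.reverse_append]
      simp

lemma pvRev (xs : List Char) :
    PySem.List.slice? xs (some (PySem.List.len xs)) none (-1) = some xs.reverse := by
  cases xs with
  | nil => decide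
  | cons x t =>
    unfold PySem.List.slice? PySem.List.sliceIndices
    rw [if_neg (by norm_num : ¬ (-1 : Int) = 0)]
    dsimp only
    norm_num
    have h1 : ¬ ((t.length : Int) + 1 < 0) := by omega
    simp only [if_neg h1]
    rw [if_pos (by omega : (-1 : Int) < (t.length : Int))]
    have h2 : ((t.length : Int) + 1).toNat = t.length + 1 := by omega
    rw [h2]
    have hcg : List.filterMap (fun k : Nat => (x :: t)[((t.length : Int) + -(k : Int)).toNat]?) (List.range (t.length + 1))
        = List.filterMap (fun k : Nat => (x :: t)[t.length + 1 - 1 - k]?) (List.range (t.length + 1)) := by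
      apply List.filterMap_congr
      intro k hk
      have hk' := List.mem_range.1 hk
      have : ((t.length : Int) + -(k : Int)).toNat = t.length + 1 - 1 - k := by omega
      rw [this]
    rw [hcg, pvFMrev (t.length + 1) (x :: t) (by simp)]
    simp

-- ===== VERDICT (by name: the statement is the Claim_ definition above) =====
theorem ozet_spec : Claim_equal_ozet := by
  intro girdi hdom hpre
  unfold Spec_ozet
  unfold Pre_ozet at hpre
  unfold Dom_ozet pvDomStr at hdom
  rcases hL : girdi.toList with _ | ⟨c0, _ | ⟨c1, _ | ⟨c2, _ | ⟨c3, _ | ⟨c4, _ | ⟨c5, rest⟩⟩⟩⟩⟩⟩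
  all_goals try (rw [hL] at hpre; simp only [List.length_cons, List.length_nil] at hpre; omega)
  try rw [hL] at hdom
  rw [List.all_cons, List.all_cons, List.all_cons, List.all_cons, List.all_cons,
    List.all_cons] at hdom
  simp only [Bool.and_eq_true] at hdom
  obtain ⟨h0, h1, h2, h3, h4, h5, -⟩ := hdom
  have hb : ∀ {c : Char}, pvDomChar c = true → c.toNat < 127 := by
    intro c hc
    unfold pvDomChar at hc
    simp only [Bool.or_eq_true, Bool.and_eq_true, decide_eq_true_eq, beq_iff_eq] at hc
    rcases hc with ((⟨ha1, ha2⟩ | h9) | h10) | h13 <;> omega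
  unfold ozet ozet_alt
  rw [hL]
  dsimp only
  rw [pvAsciA c0 c1 c2 c3 c4 c5 rest, pvAsciB c0 c1 c2 c3 c4 c5 rest]
  set T := (([c0,c1,c2,c3,c4,c5]).map
      (fun c => PySem.Chars.zfill (PySem.Int.toChars ((c.toNat : Int))) 3)).flatten with hT
  have hTd : ∀ c ∈ T, c.isDigit := by
    intro c hc
    rw [hT] at hc
    simp only [List.mem_flatten, List.mem_map] at hc
    obtain ⟨l, ⟨x, hx, rfl⟩, hcl⟩ := hc
    simp only [List.mem_cons, List.not_mem_nil, or_false] at hx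
    rcases hx with rfl | rfl | rfl | rfl | rfl | rfl
    · exact List.all_eq_true.1 (pvTripleDigits _ (hb h0)) _ hcl
    · exact List.all_eq_true.1 (pvTripleDigits _ (hb h1)) _ hcl
    · exact List.all_eq_true.1 (pvTripleDigits _ (hb h2)) _ hcl
    · exact List.all_eq_true.1 (pvTripleDigits _ (hb h3)) _ hcl
    · exact List.all_eq_true.1 (pvTripleDigits _ (hb h4)) _ hcl
    · exact List.all_eq_true.1 (pvTripleDigits _ (hb h5)) _ hcl
  have hTne : T ≠ [] := by
    rw [hT]
    intro hnil
    have h0' := (List.flatten_eq_nil_iff.1 hnil)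
      (PySem.Chars.zfill (PySem.Int.toChars ((c0.toNat : Int))) 3) (by simp)
    have hlen0 := congrArg List.length h0'
    rw [PySem.Chars.length_zfill] at hlen0
    simp at hlen0
  have hm : 0 ≤ (PySem.Int.ofChars? T).getD 0 := pvNonneg T hTne hTd
  have hbin : ∀ c ∈ (PySem.Int.toBinChars0b ((PySem.Int.ofChars? T).getD 0)).drop 2,
      c = '0' ∨ c = '1' := by
    intro c hc
    unfold PySem.Int.toBinChars0b at hc
    rw [if_neg (by omega)] at hc
    simp only [List.drop_succ_cons, List.drop_zero] at hc
    unfold Nat.toDigits at hc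
    exact pvToDigitsBits _ _ [] (by simp) c hc
  set BS := PySem.Chars.zfill ((PySem.Int.toBinChars0b ((PySem.Int.ofChars? T).getD 0)).drop 2) 64
    with hBS
  have hbits : ∀ c ∈ BS, c = '0' ∨ c = '1' := by rw [hBS]; exact pvZfillBits _ _ hbin
  have hlen : 64 ≤ BS.length := by
    rw [hBS, PySem.Chars.length_zfill]
    simp
  rw [pvRev BS, PySem.List.slice?_none_none_neg_one]
  simp only [Option.getD_some]
  have hbitsR : ∀ c ∈ BS.reverse, c = '0' ∨ c = '1' := fun c hc => hbits c (List.mem_reverse.1 hc)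
  have hlenR : 64 ≤ BS.reverse.length := by rw [List.length_reverse]; exact hlen
  have hslice : ∀ (L : List Char), 64 ≤ L.length →
      (PySem.List.slice L none (some 32)).length = 32 ∧
      32 ≤ (PySem.List.slice L (some 32) none).length := by
    intro L hL64
    constructor
    · rw [show (32:Int) = ((32:Nat):Int) by norm_num, PySem.List.slice_to_natCast,
        List.length_take]
      omega
    · rw [show (32:Int) = ((32:Nat):Int) by norm_num, PySem.List.slice_from_natCast,
        List.length_drop]
      omega
  obtain ⟨hla1, hlb1⟩ := hslice BS hlen
  obtain ⟨hla2, hlb2⟩ := hslice BS.reverse hlenR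
  have hcf1 := pvCFBit (PySem.List.slice BS none (some 32)) (PySem.List.slice BS (some 32) none)
    Int.land
    (fun c hc => hbits c (PySem.List.mem_of_mem_slice _ _ _ hc))
    (fun c hc => hbits c (PySem.List.mem_of_mem_slice _ _ _ hc)) hla1 hlb1
    (fun x y hx hy => pvLandBit hx hy)
  have hcf2 := pvCFBit (PySem.List.slice BS.reverse none (some 32))
    (PySem.List.slice BS.reverse (some 32) none) Int.lor
    (fun c hc => hbitsR c (PySem.List.mem_of_mem_slice _ _ _ hc))
    (fun c hc => hbitsR c (PySem.List.mem_of_mem_slice _ _ _ hc)) hla2 hlb2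
    (fun x y hx hy => pvLorBit hx hy)
  rw [pvHalfA _ _ Int.land hcf1, pvHalfA _ _ Int.lor hcf2,
    pvHalfB _ _ Int.land hcf1, pvHalfB _ _ Int.lor hcf2]
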